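-- pv_equiv track=rewrite | github.com/ShailadhShinde/FastAPII | utils.py | determine_horizontal_boundaries
-- ===== SOURCE A (Python) =====
-- from typing import Dict, List, Tuple
--
-- def determine_horizontal_boundaries(start_row: int, start_col: int, row_to_cols: Dict[int, List[int]], total_cols: int) -> Tuple[int, int]:
--     """Determine left/right boundaries for a table"""
--     cols_on_this_row = row_to_cols[start_row].copy()
--     cols_on_this_row.sort()
--
--     # Default full width
--     left = 0
--     right = total_cols
--
--     if len(cols_on_this_row) > 1:
--         # Build list of segments between each title column
--         segments = []
--         for i in range(len(cols_on_this_row)):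
--             seg_start = cols_on_this_row[i]
--             if i + 1 < len(cols_on_this_row):
--                 seg_end = cols_on_this_row[i + 1]
--             else:
--                 seg_end = total_cols
--             segments.append((seg_start, seg_end))
--
--         # Find which segment contains our start_col
--         for seg_left, seg_right in segments:
--             if seg_left <= start_col < seg_right:
--                 left = seg_left
--                 right = seg_right
--                 break
--
--     return left, right
-- ===== SOURCE B (Python) =====
-- def determine_horizontal_boundaries(start_row, start_col, row_to_cols, total_cols):
--     """Determine left/right boundaries for a table (binary search, no segment list)"""
--     cols = sorted(row_to_cols[start_row])
--     if len(cols) > 1: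
--         # rightmost index idx with cols[idx] <= start_col (hand-rolled bisect_right - 1)
--         lo, hi = 0, len(cols)
--         while lo < hi:
--             mid = (lo + hi) // 2
--             if start_col < cols[mid]:
--                 hi = mid
--             else:
--                 lo = mid + 1
--         idx = lo - 1
--         if idx >= 0:
--             seg_right = cols[idx + 1] if idx + 1 < len(cols) else total_cols
--             if start_col < seg_right:
--                 return cols[idx], seg_right
--     return 0, total_cols
-- ===== Notes on version B (the rewrite author's own statement) =====
-- stated objective: alternative
-- what changed: Replaces A's explicit segment-list construction plus linear first-match scan with a hand-rolled binary search (bisect_right - 1) that locates the segment containing start_col directly, keeping the len>1 gate and the start_col < seg_right re-check.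
import Mathlib
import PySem

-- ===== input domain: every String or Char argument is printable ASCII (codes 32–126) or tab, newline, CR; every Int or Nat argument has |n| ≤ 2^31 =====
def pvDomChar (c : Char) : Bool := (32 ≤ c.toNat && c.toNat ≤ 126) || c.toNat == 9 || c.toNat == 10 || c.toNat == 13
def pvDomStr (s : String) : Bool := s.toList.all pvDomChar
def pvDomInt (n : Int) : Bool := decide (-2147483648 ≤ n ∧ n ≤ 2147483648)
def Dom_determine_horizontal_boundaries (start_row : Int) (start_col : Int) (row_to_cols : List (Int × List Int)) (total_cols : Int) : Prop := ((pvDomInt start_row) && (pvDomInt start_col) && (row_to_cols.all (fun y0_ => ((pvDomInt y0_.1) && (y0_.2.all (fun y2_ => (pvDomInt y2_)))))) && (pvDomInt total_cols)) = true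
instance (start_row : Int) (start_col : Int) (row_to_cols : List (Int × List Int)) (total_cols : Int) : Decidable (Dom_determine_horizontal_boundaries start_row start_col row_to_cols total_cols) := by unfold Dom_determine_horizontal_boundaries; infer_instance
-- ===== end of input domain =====

-- B replaces A's segment-list build + linear scan by a hand-rolled binary search (bisect_right - 1); alternative algorithm, same sort-dominated cost.

-- ===== PORT A =====
-- Literal port of A: look the row up, copy+sort, build the segment list with a fold
-- over range(len(cols)), then scan for the first segment containing start_col
-- (the for-loop with break is ported as List.find?).
def determine_horizontal_boundaries (start_row : Int) (start_col : Int) (row_to_cols : List (Int × List Int)) (total_cols : Int) : Int × Int :=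
  match (PySem.Dict.mk row_to_cols).get? start_row with
  | none => (0, 0)  -- Python raises KeyError here; excluded by Pre_
  | some raw =>
    let cols := PySem.List.sorted raw (fun x => x) false
    if cols.length > 1 then
      let segments := (PySem.List.pyRange 0 (cols.length : Int) 1).foldl
        (fun acc i => acc ++ [(PySem.List.pyGetD cols i 0,
          if i + 1 < (cols.length : Int) then PySem.List.pyGetD cols (i + 1) 0 else total_cols)]) []
      match segments.find? (fun s => decide (s.1 ≤ start_col) && decide (start_col < s.2)) with
      | some s => s
      | none => (0, total_cols)
    else (0, total_cols)

-- ===== PORT B =====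
-- The while-loop binary search of Source B, with fuel = len(cols) (hi - lo starts at
-- len(cols) and shrinks every turn, so the fuel is never exhausted); an out-of-range
-- index, which the loop never reaches, yields lo.
def pvBisectLoop (xs : List Int) (x : Int) : Nat → Nat → Nat → Nat
  | 0, lo, _hi => lo
  | fuel + 1, lo, hi =>
    if lo < hi then
      match xs[(lo + hi) / 2]? with
      | some y => if x < y then pvBisectLoop xs x fuel lo ((lo + hi) / 2)
                  else pvBisectLoop xs x fuel ((lo + hi) / 2 + 1) hi
      | none => lo
    else lo

def determine_horizontal_boundaries_alt (start_row : Int) (start_col : Int) (row_to_cols : List (Int × List Int)) (total_cols : Int) : Int × Int :=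
  match (PySem.Dict.mk row_to_cols).get? start_row with
  | none => (0, 0)  -- Python raises KeyError here; excluded by Pre_
  | some raw =>
    let cols := PySem.List.sorted raw (fun x => x) false
    if cols.length > 1 then
      let idx : Int := (pvBisectLoop cols start_col cols.length 0 cols.length : Int) - 1
      if 0 ≤ idx then
        let seg_right := if idx + 1 < (cols.length : Int)
          then PySem.List.pyGetD cols (idx + 1) 0 else total_cols
        if start_col < seg_right then (PySem.List.pyGetD cols idx 0, seg_right)
        else (0, total_cols)
      else (0, total_cols)
    else (0, total_cols)

-- ===== PRECONDITION & SPEC =====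
-- Pre_: A (and B) raise KeyError when start_row is not a key of row_to_cols; nothing else is excluded.
def Pre_determine_horizontal_boundaries (start_row : Int) (start_col : Int) (row_to_cols : List (Int × List Int)) (total_cols : Int) : Prop :=
  start_row ∈ row_to_cols.map Prod.fst
instance (start_row : Int) (start_col : Int) (row_to_cols : List (Int × List Int)) (total_cols : Int) : Decidable (Pre_determine_horizontal_boundaries start_row start_col row_to_cols total_cols) := by unfold Pre_determine_horizontal_boundaries; infer_instance

def pvWitness_determine_horizontal_boundaries : Int × Int × (List (Int × List Int)) × Int := (0, 1, [(0, [0, 3])], 5)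

def Spec_determine_horizontal_boundaries (start_row : Int) (start_col : Int) (row_to_cols : List (Int × List Int)) (total_cols : Int) (out : Int × Int) : Prop := out = determine_horizontal_boundaries_alt start_row start_col row_to_cols total_cols
instance (start_row : Int) (start_col : Int) (row_to_cols : List (Int × List Int)) (total_cols : Int) (out : Int × Int) : Decidable (Spec_determine_horizontal_boundaries start_row start_col row_to_cols total_cols out) := by unfold Spec_determine_horizontal_boundaries; infer_instance

-- ===== CLAIM (what is proved, stated in full; the proofs are below) =====
def Claim_equal_determine_horizontal_boundaries : Prop := ∀ (start_row : Int) (start_col : Int) (row_to_cols : List (Int × List Int)) (total_cols : Int), Dom_determine_horizontal_boundaries start_row start_col row_to_cols total_cols → Pre_determine_horizontal_boundaries start_row start_col row_to_cols total_cols → Spec_determine_horizontal_boundaries start_row start_col row_to_cols total_cols (determine_horizontal_boundaries start_row start_col row_to_cols total_cols)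

-- ===== LEMMAS AND PROOFS =====

-- B's hand-rolled loop is step-for-step CPython's bisect_right as modelled by PySem.
lemma pvBisectLoop_eq_loop (xs : List Int) (x : Int) :
    ∀ fuel lo hi, pvBisectLoop xs x fuel lo hi = PySem.List.bisectRightLoop xs x fuel lo hi := by
  intro fuel
  induction fuel with
  | zero => intro lo hi; rfl
  | succ n ih =>
    intro lo hi
    simp only [pvBisectLoop, PySem.List.bisectRightLoop]
    split
    · cases h : xs[(lo + hi) / 2]? with
      | none => simp
      | some y => simp [ih]
    · rfl

lemma pvBisectLoop_eq_bisectRight (xs : List Int) (x : Int) :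
    pvBisectLoop xs x xs.length 0 xs.length = PySem.List.bisectRight xs x := by
  rw [pvBisectLoop_eq_loop]; rfl

-- A's segment-building fold, in closed form.
lemma segments_eq (cols : List Int) (tc : Int) :
    (PySem.List.pyRange 0 (cols.length : Int) 1).foldl
      (fun acc i => acc ++ [(PySem.List.pyGetD cols i 0,
        if i + 1 < (cols.length : Int) then PySem.List.pyGetD cols (i + 1) 0 else tc)]) []
    = (List.range cols.length).map
      (fun j => (cols.getD j 0, if j + 1 < cols.length then cols.getD (j + 1) 0 else tc)) := by
  rw [PySem.List.foldl_append_singleton_eq_map, PySem.List.pyRange_one]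
  simp only [List.nil_append, Int.sub_zero, Int.toNat_natCast, List.map_map]
  refine List.map_congr_left (fun j _ => ?_)
  have h1 : (0 : Int) + (j : Int) = ((j : Nat) : Int) := by omega
  have h2 : ((j : Nat) : Int) + 1 = (((j + 1 : Nat)) : Int) := by omega
  simp only [Function.comp, h1, h2, PySem.List.pyGetD_natCast]
  by_cases h : j + 1 < cols.length
  · rw [if_pos (by exact_mod_cast h), if_pos h]
  · rw [if_neg (by exact_mod_cast h), if_neg h]

-- The heart of the file: on a sorted list of length ≥ 2, A's first-match scan over the
-- segment list returns exactly what B's bisect-based lookup returns.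
lemma core_eq (cols : List Int) (sc tc : Int)
    (hp : cols.Pairwise (· ≤ ·)) (hn : 1 < cols.length) :
    (match ((List.range cols.length).map
        (fun j => (cols.getD j 0, if j + 1 < cols.length then cols.getD (j + 1) 0 else tc))).find?
        (fun s => decide (s.1 ≤ sc) && decide (sc < s.2)) with
     | some s => s
     | none => ((0 : Int), tc))
    = (if 0 ≤ (PySem.List.bisectRight cols sc : Int) - 1 then
        if sc < (if (PySem.List.bisectRight cols sc : Int) - 1 + 1 < (cols.length : Int)
            then PySem.List.pyGetD cols ((PySem.List.bisectRight cols sc : Int) - 1 + 1) 0 else tc)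
        then (PySem.List.pyGetD cols ((PySem.List.bisectRight cols sc : Int) - 1) 0,
              (if (PySem.List.bisectRight cols sc : Int) - 1 + 1 < (cols.length : Int)
                then PySem.List.pyGetD cols ((PySem.List.bisectRight cols sc : Int) - 1 + 1) 0 else tc))
        else ((0 : Int), tc)
      else ((0 : Int), tc)) := by
  obtain ⟨hk, hlt, hge⟩ := PySem.List.bisectRight_spec cols sc hp
  set k := PySem.List.bisectRight cols sc with hkdef
  set f := fun j => (cols.getD j 0, if j + 1 < cols.length then cols.getD (j + 1) 0 else tc) with hf
  -- component values of f j
  have hf1 : ∀ j (hj : j < cols.length), (f j).1 = cols[j] := fun j hj => by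
    simp only [hf]; exact List.getD_eq_getElem cols 0 hj
  have hf2lo : ∀ j (hj : j + 1 < cols.length), (f j).2 = cols[j + 1] := fun j hj => by
    simp only [hf, if_pos hj]; exact List.getD_eq_getElem cols 0 hj
  have hf2hi : ∀ j, ¬ j + 1 < cols.length → (f j).2 = tc := fun j hj => by
    simp only [hf, if_neg hj]
  -- the scan predicate fails on every segment strictly before index k - 1
  have hfail_low : ∀ j, j + 1 < cols.length → j + 1 < k →
      (decide ((f j).1 ≤ sc) && decide (sc < (f j).2)) = false := by
    intro j hj hjk
    have hle : cols[j + 1] ≤ sc := hlt _ hj hjk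
    rw [hf2lo j hj]
    simp [not_lt.mpr hle]
  match hk0 : k with
  | 0 =>
    -- nothing ≤ sc: every segment start is > sc, no match; both sides give the default
    have hnone : ((List.range cols.length).map f).find?
        (fun s => decide (s.1 ≤ sc) && decide (sc < s.2)) = none := by
      rw [List.find?_eq_none]
      intro x hx
      obtain ⟨j, hj, rfl⟩ := List.mem_map.mp hx
      have hjlen := List.mem_range.mp hj
      have hgt : sc < cols[j] := hge j hjlen (by omega)
      rw [Bool.not_eq_true]
      rw [hf1 j hjlen]
      simp [not_le.mpr hgt]
    simp [hnone]
  | (k' + 1) =>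
    have hk' : k' + 1 ≤ cols.length := by omega
    have hidx : (0 : Int) ≤ ((k' + 1 : Nat) : Int) - 1 := by push_cast; omega
    have hcastidx : ((k' + 1 : Nat) : Int) - 1 = ((k' : Nat) : Int) := by push_cast; omega
    have hcastidx1 : ((k' + 1 : Nat) : Int) - 1 + 1 = ((k' + 1 : Nat) : Int) := by push_cast; omega
    have gA : PySem.List.pyGetD cols ((k' : Nat) : Int) 0 = cols[k']'(by omega) := by
      rw [PySem.List.pyGetD_natCast]; exact List.getD_eq_getElem cols 0 (by omega)
    by_cases hin : k' + 1 < cols.length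
    · -- B returns (cols[k'], cols[k'+1]); A's first match is the segment at index k'
      have hcastlt : ((k' + 1 : Nat) : Int) < (cols.length : Int) := by exact_mod_cast hin
      have gB : PySem.List.pyGetD cols ((k' + 1 : Nat) : Int) 0 = cols[k' + 1] := by
        rw [PySem.List.pyGetD_natCast]; exact List.getD_eq_getElem cols 0 hin
      have hsome : ((List.range cols.length).map f).find?
          (fun s => decide (s.1 ≤ sc) && decide (sc < s.2)) = some (f k') := by
        rw [List.find?_eq_some_iff_getElem]
        refine ⟨?_, k', by simpa using (by omega : k' < cols.length), by simp, ?_⟩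
        · rw [hf1 k' (by omega), hf2lo k' hin]
          have h1 : cols[k']'(by omega) ≤ sc := hlt k' (by omega) (by omega)
          have h2 : sc < cols[k' + 1] := hge (k' + 1) hin (by omega)
          simp [h1, h2]
        · intro j hj
          have hjlen : j < cols.length := by omega
          simp only [List.getElem_map, List.getElem_range]
          rw [hfail_low j (by omega) (by omega)]; rfl
      rw [hsome, if_pos hidx, hcastidx1, hcastidx]
      have hsr : sc < PySem.List.pyGetD cols ((k' + 1 : Nat) : Int) 0 := by
        rw [gB]; exact hge (k' + 1) hin (by omega)
      rw [if_pos hcastlt, if_pos hsr, gA, gB]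
      show f k' = (cols[k']'(by omega), cols[k' + 1])
      rw [Prod.ext_iff]
      exact ⟨hf1 k' (by omega), hf2lo k' hin⟩
    · -- k = len: last segment (cols[len-1], total_cols); it matches iff sc < total_cols
      have hkn : k' + 1 = cols.length := by omega
      have hncastlt : ¬ ((k' + 1 : Nat) : Int) < (cols.length : Int) := by
        push_cast; omega
      by_cases hsc : sc < tc
      · have hsome : ((List.range cols.length).map f).find?
            (fun s => decide (s.1 ≤ sc) && decide (sc < s.2)) = some (f k') := by
          rw [List.find?_eq_some_iff_getElem]
          refine ⟨?_, k', by simpa using (by omega : k' < cols.length), by simp, ?_⟩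
          · rw [hf1 k' (by omega), hf2hi k' hin]
            have h1 : cols[k']'(by omega) ≤ sc := hlt k' (by omega) (by omega)
            simp [h1, hsc]
          · intro j hj
            have hjlen : j < cols.length := by omega
            simp only [List.getElem_map, List.getElem_range]
            rw [hfail_low j (by omega) (by omega)]; rfl
        rw [hsome, if_pos hidx, hcastidx1, hcastidx, if_neg hncastlt, if_pos hsc, gA]
        show f k' = (cols[k']'(by omega), tc)
        rw [Prod.ext_iff]
        exact ⟨hf1 k' (by omega), hf2hi k' hin⟩
      · have hnone : ((List.range cols.length).map f).find?
            (fun s => decide (s.1 ≤ sc) && decide (sc < s.2)) = none := by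
          rw [List.find?_eq_none]
          intro x hx
          obtain ⟨j, hj, rfl⟩ := List.mem_map.mp hx
          have hjlen := List.mem_range.mp hj
          rw [Bool.not_eq_true]
          by_cases hjn : j + 1 < cols.length
          · exact hfail_low j hjn (by omega)
          · rw [hf2hi j hjn]
            simp [hsc]
        rw [hnone, if_pos hidx, hcastidx1, if_neg hncastlt, if_neg hsc]

-- ===== VERDICT (by name: the statement is the Claim_ definition above) =====
theorem determine_horizontal_boundaries_spec : Claim_equal_determine_horizontal_boundaries := by
  intro start_row start_col row_to_cols total_cols _hdom _hpre
  unfold Spec_determine_horizontal_boundaries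
  unfold determine_horizontal_boundaries determine_horizontal_boundaries_alt
  cases hget : (PySem.Dict.mk row_to_cols).get? start_row with
  | none => rfl
  | some raw =>
    simp only []
    set cols := PySem.List.sorted raw (fun x => x) false with hcols
    by_cases hlen : cols.length > 1
    · rw [if_pos hlen, if_pos hlen]
      rw [segments_eq, pvBisectLoop_eq_bisectRight]
      exact core_eq cols start_col total_cols
        (by simpa using PySem.List.sorted_pairwise raw (fun x => x)) hlen
    · rw [if_neg hlen, if_neg hlen]
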